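-- pv_equiv track=rewrite | github.com/pypi-data/pypi-mirror-236 | packages/qufi-script/qufi_script-1.0.0-py3-none-any.whl/qufi/utils/filters.py | filter_unchangeable_words
-- ===== SOURCE A (Python) =====
-- def filter_unchangeable_words(text: str) -> dict:
--     split = False
--     words_dict = {}
--     temp_text = ""
--     for latter in text:
--         if latter == '`':
--             if split:
--                 split = False
--                 words_dict['`%s`' % temp_text] = temp_text
--                 temp_text = ''
--             else:
--                 split = True
--         else:
--             if split:
--                 temp_text += latter
--     return words_dict
-- ===== SOURCE B (Python) =====
-- def filter_unchangeable_words(text: str) -> dict: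
--     words = {}
--     rest = text
--     while True:
--         _before, sep, rest = rest.partition('`')
--         if not sep:
--             return words
--         w, sep, rest = rest.partition('`')
--         if not sep:
--             return words
--         words[f'`{w}`'] = w
-- ===== Notes on version B (the rewrite author's own statement) =====
-- stated objective: faster
-- what changed: Replaces the char-by-char split/temp state machine with a loop that jumps between backticks using str.partition, taking each quoted run in one slice and inserting it directly.
import Mathlib
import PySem

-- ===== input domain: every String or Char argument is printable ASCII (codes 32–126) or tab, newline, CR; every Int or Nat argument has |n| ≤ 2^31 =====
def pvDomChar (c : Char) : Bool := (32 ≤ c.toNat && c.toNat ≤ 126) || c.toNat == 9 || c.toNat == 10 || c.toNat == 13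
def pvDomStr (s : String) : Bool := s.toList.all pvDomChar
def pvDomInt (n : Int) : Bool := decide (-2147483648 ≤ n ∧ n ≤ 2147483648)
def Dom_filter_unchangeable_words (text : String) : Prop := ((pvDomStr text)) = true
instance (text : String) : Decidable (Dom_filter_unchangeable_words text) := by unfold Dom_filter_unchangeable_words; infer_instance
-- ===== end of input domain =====

-- B replaces A's char-by-char toggle state machine with a partition-driven loop that jumps
-- from backtick to backtick, slicing each quoted run out whole (faster constant factor in Python).

-- ===== PORT A =====
-- one step of A's for-loop; state = (split, words_dict, temp_text as char list)
def pvStepA (st : Bool × PySem.Dict String String × List Char) (latter : Char) :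
    Bool × PySem.Dict String String × List Char :=
  if latter = '`' then
    if st.1 then (false, st.2.1.insert ("`" ++ String.ofList st.2.2 ++ "`") (String.ofList st.2.2), [])
    else (true, st.2.1, st.2.2)
  else
    if st.1 then (st.1, st.2.1, st.2.2 ++ [latter]) else st

def filter_unchangeable_words (text : String) : List (String × String) :=
  ((text.toList.foldl pvStepA (false, PySem.Dict.empty, [])).2.1).items

-- ===== PORT B =====
-- B's while loop: rest.partition('`') is ported by hand (exact: first '`' via PySem.List.index?,
-- the 'sep is empty' test is the 'none' branch); each iteration consumes up to two backticks.
def pvAltLoop (rest : List Char) (words : PySem.Dict String String) : PySem.Dict String String :=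
  match h : PySem.List.index? rest '`' with
  | none => words
  | some i =>
    match h2 : PySem.List.index? (rest.drop (i + 1)) '`' with
    | none => words
    | some j =>
      pvAltLoop ((rest.drop (i + 1)).drop (j + 1))
        (words.insert ("`" ++ String.ofList ((rest.drop (i + 1)).take j) ++ "`")
          (String.ofList ((rest.drop (i + 1)).take j)))
termination_by rest.length
decreasing_by
  obtain ⟨hk, -⟩ := PySem.List.getElem_of_index?_eq_some h
  simp only [List.length_drop]
  omega

def filter_unchangeable_words_alt (text : String) : List (String × String) :=
  (pvAltLoop text.toList PySem.Dict.empty).items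

-- ===== PRECONDITION & SPEC =====
def Spec_filter_unchangeable_words (text : String) (out : List (String × String)) : Prop := out = filter_unchangeable_words_alt text
instance (text : String) (out : List (String × String)) : Decidable (Spec_filter_unchangeable_words text out) := by unfold Spec_filter_unchangeable_words; infer_instance

-- ===== CLAIM (what is proved, stated in full; the proofs are below) =====
def Claim_equal_filter_unchangeable_words : Prop := ∀ (text : String), Dom_filter_unchangeable_words text → Spec_filter_unchangeable_words text (filter_unchangeable_words text)

-- ===== LEMMAS AND PROOFS =====

-- in split=False state, characters other than '`' are ignored
lemma foldl_stepA_false_noTick (cs : List Char) (h : '`' ∉ cs)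
    (d : PySem.Dict String String) (t : List Char) :
    cs.foldl pvStepA (false, d, t) = (false, d, t) := by
  induction cs with
  | nil => rfl
  | cons c cs ih =>
    have hc : c ≠ '`' := fun hc => h (hc ▸ List.mem_cons_self)
    have hcs : '`' ∉ cs := fun hm => h (List.mem_cons_of_mem _ hm)
    simp [List.foldl_cons, pvStepA, hc, ih hcs]

-- in split=True state, characters other than '`' are appended to temp_text
lemma foldl_stepA_true_noTick (cs : List Char) (h : '`' ∉ cs)
    (d : PySem.Dict String String) (t : List Char) :
    cs.foldl pvStepA (true, d, t) = (true, d, t ++ cs) := by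
  induction cs generalizing t with
  | nil => simp
  | cons c cs ih =>
    have hc : c ≠ '`' := fun hc => h (hc ▸ List.mem_cons_self)
    have hcs : '`' ∉ cs := fun hm => h (List.mem_cons_of_mem _ hm)
    simp [List.foldl_cons, pvStepA, hc, ih hcs]

-- the core invariant: A's fold started in the idle state produces B's loop result
lemma loopA_eq_altLoop (n : Nat) : ∀ cs : List Char, cs.length ≤ n →
    ∀ d : PySem.Dict String String,
    (cs.foldl pvStepA (false, d, [])).2.1 = pvAltLoop cs d := by
  induction n with
  | zero =>
    intro cs hcs d
    have hnil : cs = [] := List.eq_nil_of_length_eq_zero (Nat.le_zero.mp hcs)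
    subst hnil
    rw [pvAltLoop.eq_def]
    simp [PySem.List.index?_eq_idxOf?]
  | succ n ih =>
    intro cs hcs d
    rw [pvAltLoop.eq_def]
    split
    next h =>
      have hnm : '`' ∉ cs := (PySem.List.index?_eq_none_iff cs '`').mp h
      rw [foldl_stepA_false_noTick cs hnm]
    next i h =>
      obtain ⟨pre, suf, hdecomp, hlen, hpre⟩ := (PySem.List.index?_eq_some_iff cs '`' i).mp h
      have hdrop : cs.drop (i + 1) = suf := by
        subst hdecomp
        rw [show pre ++ '`' :: suf = (pre ++ ['`']) ++ suf by simp]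
        exact List.drop_left' (by simp [hlen])
      split
      next h2 =>
        have hnm2 : '`' ∉ suf := by
          rw [← hdrop]; exact (PySem.List.index?_eq_none_iff _ '`').mp h2
        rw [hdecomp, List.foldl_append, foldl_stepA_false_noTick pre hpre, List.foldl_cons]
        have s1 : pvStepA (false, d, []) '`' = (true, d, []) := by simp [pvStepA]
        rw [s1, foldl_stepA_true_noTick suf hnm2]
      next j h2 =>
        rw [hdrop] at h2
        obtain ⟨w, rest2, hdecomp2, hlen2, hw⟩ := (PySem.List.index?_eq_some_iff suf '`' j).mp h2
        have hdrop2 : suf.drop (j + 1) = rest2 := by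
          subst hdecomp2
          rw [show w ++ '`' :: rest2 = (w ++ ['`']) ++ rest2 by simp]
          exact List.drop_left' (by simp [hlen2])
        have htake : suf.take j = w := by
          subst hdecomp2
          exact List.take_left' hlen2
        simp only [hdrop, hdrop2, htake]
        rw [hdecomp, List.foldl_append, foldl_stepA_false_noTick pre hpre, List.foldl_cons]
        have s1 : pvStepA (false, d, []) '`' = (true, d, []) := by simp [pvStepA]
        rw [s1, hdecomp2, List.foldl_append, foldl_stepA_true_noTick w hw, List.foldl_cons]
        have s2 : pvStepA (true, d, [] ++ w) '`' =
            (false, d.insert ("`" ++ String.ofList w ++ "`") (String.ofList w), []) := by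
          simp [pvStepA]
        rw [s2]
        have hrest2 : rest2.length ≤ n := by
          have h1 : cs.length = pre.length + 1 + suf.length := by simp [hdecomp]; omega
          have h3 : suf.length = w.length + 1 + rest2.length := by simp [hdecomp2]; omega
          omega
        exact ih rest2 hrest2 _

-- ===== VERDICT (by name: the statement is the Claim_ definition above) =====
theorem filter_unchangeable_words_spec : Claim_equal_filter_unchangeable_words := by
  intro text _
  unfold Spec_filter_unchangeable_words filter_unchangeable_words filter_unchangeable_words_alt
  rw [loopA_eq_altLoop text.toList.length text.toList (Nat.le_refl _)]
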